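-- pv_equiv track=rewrite | github.com/nlgio/gnuvet | util.py | prep_txt
-- ===== SOURCE A (Python) =====
-- def prep_txt(entry='', escape=False):
--     """Prepare entry for sql query, quote 'dangerous' chars.
--     escape=True for select, False for insert."""
--     seps = ['\\', "'"]
--     if escape:
--         seps.extend(['%', '_'])
--     entry=str(entry)
--     for sep in seps:
--         if escape and sep == '\\':
--             entry = entry.replace(sep, '\\\\\\\\')
--         else:
--             entry = entry.replace(sep, '\\{}'.format(sep))
--     return ' '.join(entry.split())
-- ===== SOURCE B (Python) =====
-- def prep_txt(entry='', escape=False):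
--     entry = str(entry)
--     if escape:
--         table = {ord('\\'): '\\\\\\\\', ord("'"): "\\'", ord('%'): '\\%', ord('_'): '\\_'}
--     else:
--         table = {ord('\\'): '\\\\', ord("'"): "\\'"}
--     return ' '.join(entry.translate(table).split())
-- ===== Notes on version B (the rewrite author's own statement) =====
-- stated objective: idiomatic
-- what changed: Replaces A's 2-4 sequential str.replace scans with a single character-translation table (dict keyed by ordinals, built per the escape flag) applied in one pass via str.translate.
import Mathlib
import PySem

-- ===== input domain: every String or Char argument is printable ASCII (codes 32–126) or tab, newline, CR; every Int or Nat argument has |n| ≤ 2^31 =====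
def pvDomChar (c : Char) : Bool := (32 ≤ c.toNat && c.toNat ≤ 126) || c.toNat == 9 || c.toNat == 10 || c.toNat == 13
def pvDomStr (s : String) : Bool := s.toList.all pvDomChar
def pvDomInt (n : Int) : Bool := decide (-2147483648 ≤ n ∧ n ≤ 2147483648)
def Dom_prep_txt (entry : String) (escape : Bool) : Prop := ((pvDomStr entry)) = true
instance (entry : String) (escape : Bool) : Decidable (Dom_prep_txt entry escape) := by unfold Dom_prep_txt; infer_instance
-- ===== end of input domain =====

-- B replaces A's 2–4 sequential replace scans by one table-driven pass (a translation
-- table applied once to each character); objective: idiomatic single-pass rewrite.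

-- ===== PORT A =====
def prep_txt (entry : String) (escape : Bool) : String :=
  let seps : List String := ["\\", "'"]
  let seps : List String := if escape then seps ++ ["%", "_"] else seps
  let entry := seps.foldl (fun entry sep =>
    if escape && sep == "\\" then PySem.Str.replace entry sep "\\\\\\\\"
    else PySem.Str.replace entry sep ("\\" ++ sep)) entry
  PySem.Str.join " " (PySem.Str.split₀ entry)

-- ===== PORT B =====
-- the escape-dependent translation table, keyed by ordinals as Python's str.translate requires
def pvTable (escape : Bool) : PySem.Dict Nat String :=
  if escape then
    ((((PySem.Dict.empty).insert 92 "\\\\\\\\").insert 39 "\\'").insert 37 "\\%").insert 95 "\\_"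
  else
    ((PySem.Dict.empty).insert 92 "\\\\").insert 39 "\\'"

-- hand port of str.translate with a {ordinal ↦ string} table; exact for such tables
def pvTranslate (s : String) (table : PySem.Dict Nat String) : String :=
  String.ofList (s.toList.flatMap (fun c =>
    match table.get? c.toNat with
    | some r => r.toList
    | none => [c]))

def prep_txt_alt (entry : String) (escape : Bool) : String :=
  PySem.Str.join " " (PySem.Str.split₀ (pvTranslate entry (pvTable escape)))

-- ===== PRECONDITION & SPEC =====
def Spec_prep_txt (entry : String) (escape : Bool) (out : String) : Prop := out = prep_txt_alt entry escape
instance (entry : String) (escape : Bool) (out : String) : Decidable (Spec_prep_txt entry escape out) := by unfold Spec_prep_txt; infer_instance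

-- ===== CLAIM (what is proved, stated in full; the proofs are below) =====
def Claim_equal_prep_txt : Prop := ∀ (entry : String) (escape : Bool), Dom_prep_txt entry escape → Spec_prep_txt entry escape (prep_txt entry escape)

-- ===== LEMMAS AND PROOFS =====

-- replacing a single-character pattern is a per-character flatMap
lemma go_single (a : Char) (r : List Char) :
    ∀ (l : List Char) (fuel : Nat) (acc : List Char), l.length ≤ fuel →
    PySem.Chars.replace.go [a] r fuel l acc
      = acc.reverse ++ l.flatMap (fun c => if c == a then r else [c]) := by
  intro l
  induction l with
  | nil =>
      intro fuel acc _
      cases fuel <;> simp [PySem.Chars.replace.go]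
  | cons c t ih =>
      intro fuel acc hle
      cases fuel with
      | zero => simp at hle
      | succ n =>
          rw [PySem.Chars.replace.go]
          by_cases h : a = c
          · subst h
            rw [if_pos (by simp [List.isPrefixOf])]
            rw [show List.drop [a].length (a :: t) = t from rfl]
            rw [ih n (r.reverse ++ acc) (by simpa using hle)]
            rw [List.flatMap_cons, if_pos (by simp)]
            simp
          · have hba : (c == a) = false := by simp [Ne.symm h]
            rw [if_neg (by simp [List.isPrefixOf, h])]
            rw [ih n (c :: acc) (by simpa using hle)]
            rw [List.flatMap_cons, if_neg (by simp [hba])]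
            simp

lemma rep_single (cs : List Char) (a : Char) (r : List Char) :
    PySem.Chars.replace cs [a] r = cs.flatMap (fun c => if c == a then r else [c]) := by
  rw [PySem.Chars.replace, if_neg (by simp)]
  exact (go_single a r cs cs.length [] le_rfl).trans (by simp)

lemma str_rep_toList (s : String) (a : Char) (pat r : String) (hp : pat.toList = [a]) :
    (PySem.Str.replace s pat r).toList
      = s.toList.flatMap (fun c => if c == a then r.toList else [c]) := by
  rw [PySem.Str.replace, hp, String.toList_ofList, rep_single]

lemma toNat_ne (c d : Char) (h : c ≠ d) : c.toNat ≠ d.toNat := by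
  intro he
  exact h (Char.ext (UInt32.toNat_inj.mp he))

lemma per_char_false (c : Char) :
    (if c == '\\' then ("\\" ++ "\\").toList else [c]).flatMap
        (fun d => if d == '\'' then ("\\" ++ "'").toList else [d])
      = (match (pvTable false).get? c.toNat with
         | some r => r.toList
         | none => [c]) := by
  have hitems : (pvTable false).items = [(92, "\\\\"), (39, "\\'")] := rfl
  by_cases h92 : c = '\\'
  · subst h92; rfl
  by_cases h39 : c = '\''
  · subst h39; rfl
  have b92 : ((92 : Nat) == c.toNat) = false :=
    beq_eq_false_iff_ne.mpr (fun he => toNat_ne c '\\' h92 (by rw [← he]; rfl))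
  have b39 : ((39 : Nat) == c.toNat) = false :=
    beq_eq_false_iff_ne.mpr (fun he => toNat_ne c '\'' h39 (by rw [← he]; rfl))
  simp [PySem.Dict.get?, hitems, List.find?, b92, b39, h92, h39]

lemma per_char_true (c : Char) :
    ((if c == '\\' then ("\\\\\\\\" : String).toList else [c]).flatMap
        (fun d => if d == '\'' then ("\\" ++ "'").toList else [d])).flatMap
        (fun d => (if d == '%' then ("\\" ++ "%").toList else [d]).flatMap
          (fun e => if e == '_' then ("\\" ++ "_").toList else [e]))
      = (match (pvTable true).get? c.toNat with
         | some r => r.toList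
         | none => [c]) := by
  have hitems : (pvTable true).items
      = [(92, "\\\\\\\\"), (39, "\\'"), (37, "\\%"), (95, "\\_")] := rfl
  by_cases h92 : c = '\\'
  · subst h92; rfl
  by_cases h39 : c = '\''
  · subst h39; rfl
  by_cases h37 : c = '%'
  · subst h37; rfl
  by_cases h95 : c = '_'
  · subst h95; rfl
  have b92 : ((92 : Nat) == c.toNat) = false :=
    beq_eq_false_iff_ne.mpr (fun he => toNat_ne c '\\' h92 (by rw [← he]; rfl))
  have b39 : ((39 : Nat) == c.toNat) = false :=
    beq_eq_false_iff_ne.mpr (fun he => toNat_ne c '\'' h39 (by rw [← he]; rfl))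
  have b37 : ((37 : Nat) == c.toNat) = false :=
    beq_eq_false_iff_ne.mpr (fun he => toNat_ne c '%' h37 (by rw [← he]; rfl))
  have b95 : ((95 : Nat) == c.toNat) = false :=
    beq_eq_false_iff_ne.mpr (fun he => toNat_ne c '_' h95 (by rw [← he]; rfl))
  simp [PySem.Dict.get?, hitems, List.find?, b92, b39, b37, b95, h92, h39, h37, h95]

-- ===== VERDICT (by name: the statement is the Claim_ definition above) =====
theorem prep_txt_spec : Claim_equal_prep_txt := by
  intro entry escape _
  show prep_txt entry escape = prep_txt_alt entry escape
  cases escape with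
  | false =>
      have hA : prep_txt entry false
          = PySem.Str.join " " (PySem.Str.split₀
              (PySem.Str.replace (PySem.Str.replace entry "\\" ("\\" ++ "\\")) "'" ("\\" ++ "'"))) := by
        simp only [prep_txt, Bool.false_and, Bool.false_eq_true, if_false, List.foldl_cons,
          List.foldl_nil]
      have hB : prep_txt_alt entry false
          = PySem.Str.join " " (PySem.Str.split₀ (pvTranslate entry (pvTable false))) := rfl
      have hlist : (PySem.Str.replace (PySem.Str.replace entry "\\" ("\\" ++ "\\")) "'" ("\\" ++ "'")).toList
          = (pvTranslate entry (pvTable false)).toList := by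
        rw [str_rep_toList _ '\'' "'" _ rfl, str_rep_toList _ '\\' "\\" _ rfl,
          List.flatMap_assoc, pvTranslate, String.toList_ofList]
        exact List.flatMap_congr (fun c _ => per_char_false c)
      have hstr : PySem.Str.replace (PySem.Str.replace entry "\\" ("\\" ++ "\\")) "'" ("\\" ++ "'")
          = pvTranslate entry (pvTable false) := by
        have h2 := congrArg String.ofList hlist
        simpa only [String.ofList_toList] using h2
      rw [hA, hB, hstr]
  | true =>
      have hA : prep_txt entry true
          = PySem.Str.join " " (PySem.Str.split₀
              (PySem.Str.replace (PySem.Str.replace (PySem.Str.replace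
                (PySem.Str.replace entry "\\" "\\\\\\\\") "'" ("\\" ++ "'")) "%" ("\\" ++ "%")) "_" ("\\" ++ "_"))) := by
        simp only [prep_txt, Bool.true_and, List.cons_append, List.nil_append, List.foldl_cons,
          List.foldl_nil, beq_iff_eq, String.reduceEq, if_false, reduceIte]
      have hB : prep_txt_alt entry true
          = PySem.Str.join " " (PySem.Str.split₀ (pvTranslate entry (pvTable true))) := rfl
      have hlist : (PySem.Str.replace (PySem.Str.replace (PySem.Str.replace
                (PySem.Str.replace entry "\\" "\\\\\\\\") "'" ("\\" ++ "'")) "%" ("\\" ++ "%")) "_" ("\\" ++ "_")).toList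
          = (pvTranslate entry (pvTable true)).toList := by
        rw [str_rep_toList _ '_' "_" _ rfl, str_rep_toList _ '%' "%" _ rfl,
          str_rep_toList _ '\'' "'" _ rfl, str_rep_toList _ '\\' "\\" _ rfl,
          List.flatMap_assoc, List.flatMap_assoc, List.flatMap_assoc,
          pvTranslate, String.toList_ofList]
        simp only [String.toList_ofList]
        refine List.flatMap_congr (fun c _ => ?_)
        rw [← per_char_true c, List.flatMap_assoc,
          show ("\\\\\\\\" : String).toList = ['\\', '\\', '\\', '\\'] from rfl]
      have hstr : PySem.Str.replace (PySem.Str.replace (PySem.Str.replace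
                (PySem.Str.replace entry "\\" "\\\\\\\\") "'" ("\\" ++ "'")) "%" ("\\" ++ "%")) "_" ("\\" ++ "_")
          = pvTranslate entry (pvTable true) := by
        have h2 := congrArg String.ofList hlist
        simpa only [String.ofList_toList] using h2
      rw [hA, hB, hstr]
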